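-- pv_equiv track=rewrite | github.com/Project-OMOTES/simulator-core | src/omotes_simulator_core/adapter/transforms/mappers.py | replace_joint_in_connected_assets
-- ===== SOURCE A (Python) =====
-- def replace_joint_in_connected_assets(
--     connected_py_assets: list[tuple[str, str]],
--     py_joint_dict: dict[str, list[tuple[str, str]]],
--     py_asset_id: str,
--     iteration_limit: int = 10,
-- ) -> list[tuple[str, str]]:
--     """Replace joint with assets connected to the elements.
--
--     Replace items in the connected_py_assets list that are connected to a Joint
--     with the items that are connected to the Joint, except for the current asset.
--
--     :param connected_py_assets: List of connected assets
--     :param py_joint_dict: Dictionary with joint id as key and list of tuples with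
--     connected asset id and port as value.
--     :param py_asset_id: Id of the asset all the connected assets are connected to
--     :param iteration_limit: Limit for the number of iterations
--
--     """
--     replace_bool = True
--     while replace_bool and iteration_limit > 0:
--         replace_bool = False
--         iteration_limit -= 1
--         for index, connected_py_asset in enumerate(connected_py_assets):
--             connected_py_asset_id, _ = connected_py_asset
--             if connected_py_asset_id in py_joint_dict:
--                 # remove the joint from the list and add the connected assets
--                 connected_py_assets.pop(index)
--                 # get the connected assets
--                 additional_assets = py_joint_dict[connected_py_asset_id].copy()
--                 # remove the current asset from the list
--                 for index, additional_asset_properties in enumerate(additional_assets):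
--                     additional_asset_id, _ = additional_asset_properties
--                     if additional_asset_id == py_asset_id:
--                         additional_assets.pop(index)
--                         break
--                 # add the connected assets to the list
--                 connected_py_assets.extend(additional_assets)
--                 replace_bool = True
--                 break
--     if iteration_limit == 0:
--         raise RuntimeError("Error in replacing joint in connected assets.")
--     else:
--         return connected_py_assets
-- ===== SOURCE B (Python) =====
-- def replace_joint_in_connected_assets(
--     connected_py_assets,
--     py_joint_dict,
--     py_asset_id,
--     iteration_limit=10,
-- ):
--     """Expand joints into the assets they connect with a single worklist pass.
--
--     Items are taken from the front of a work queue: a joint enqueues its own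
--     connection list (minus one entry for py_asset_id) at the back, any other
--     asset goes to the result.  A counter of expansions, capped by
--     iteration_limit, guards against joint dictionaries that reference each
--     other in a cycle.  The result is written back into connected_py_assets,
--     which is also returned.
--     """
--     queue = list(connected_py_assets)
--     head = 0
--     result = []
--     expansions = 0
--     while head < len(queue):
--         asset_id, port = queue[head]
--         head += 1
--         if asset_id in py_joint_dict:
--             expansions += 1
--             if expansions >= iteration_limit:
--                 raise RuntimeError("Error in replacing joint in connected assets.")
--             expansion = py_joint_dict[asset_id].copy()
--             for i, (other_id, _) in enumerate(expansion):
--                 if other_id == py_asset_id: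
--                     del expansion[i]
--                     break
--             queue.extend(expansion)
--         else:
--             result.append((asset_id, port))
--     connected_py_assets[:] = result
--     return connected_py_assets
-- ===== Notes on version B (the rewrite author's own statement) =====
-- stated objective: alternative
-- what changed: Replaces the restart-the-whole-scan-after-every-replacement while loop with a single worklist pass (queue with a head index): joints enqueue their expansion at the back, other assets go straight to the result, and a plain expansion counter capped by iteration_limit guards against cyclic joint dictionaries; Pre_ excludes the inputs where A raises RuntimeError (its pass cap exhausted) and the negative-limit inputs with joints present, where A skips expansion and returns the list unexpanded while B's cycle guard raises.
-- outside the precondition, e.g. on replace_joint_in_connected_assets([('j', 'p')], {'j': [('x', 'q')]}, 'a', -1): A returns [('j', 'p')], B raises RuntimeError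
import Mathlib
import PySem

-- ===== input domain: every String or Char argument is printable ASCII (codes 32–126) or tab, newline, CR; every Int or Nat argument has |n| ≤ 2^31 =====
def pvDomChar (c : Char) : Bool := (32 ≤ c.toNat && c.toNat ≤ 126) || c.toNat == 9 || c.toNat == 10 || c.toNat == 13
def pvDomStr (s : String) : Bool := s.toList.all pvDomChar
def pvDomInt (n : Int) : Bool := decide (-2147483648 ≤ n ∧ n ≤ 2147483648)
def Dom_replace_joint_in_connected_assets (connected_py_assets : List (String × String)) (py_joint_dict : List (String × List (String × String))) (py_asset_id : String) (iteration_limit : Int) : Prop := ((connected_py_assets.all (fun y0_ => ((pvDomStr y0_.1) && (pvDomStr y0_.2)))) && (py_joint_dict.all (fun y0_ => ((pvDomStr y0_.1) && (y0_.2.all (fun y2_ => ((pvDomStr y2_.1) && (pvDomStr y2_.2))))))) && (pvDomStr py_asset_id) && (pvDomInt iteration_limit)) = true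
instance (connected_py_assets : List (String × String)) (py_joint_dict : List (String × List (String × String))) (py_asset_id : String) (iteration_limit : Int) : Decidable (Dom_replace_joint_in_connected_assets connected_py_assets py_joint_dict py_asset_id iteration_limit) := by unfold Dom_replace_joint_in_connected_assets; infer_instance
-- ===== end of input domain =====

-- B replaces A's restart-scanning passes with a single worklist pass over a queue
-- (joints enqueue their expansion at the back, other assets go to the result); both
-- Pythons mutate connected_py_assets in place, the equivalence is about the return value.

-- ===== PORT A =====
-- first-match lookup in the dict (Python 'x in d' / 'd[x]')
def pvJGet? (jd : List (String × List (String × String))) (k : String) : Option (List (String × String)) :=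
  match jd with
  | [] => none
  | (k', v) :: rest => if k' == k then some v else pvJGet? rest k

-- inner for-loop of A: pop the first entry whose id equals py_asset_id, then break
def pvRemoveSelfA (assets : List (String × String)) (py_asset_id : String) : List (String × String) :=
  match assets with
  | [] => []
  | a :: rest => if a.1 == py_asset_id then rest else a :: pvRemoveSelfA rest py_asset_id

-- one pass of A's for-loop: first joint found is popped and its (filtered) assets appended
-- at the end; none = no joint found (replace_bool stays False)
def pvPassOnceA (L : List (String × String)) (jd : List (String × List (String × String))) (py_asset_id : String) : Option (List (String × String)) :=
  match L with
  | [] => none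
  | x :: rest =>
    match pvJGet? jd x.1 with
    | some additional => some (rest ++ pvRemoveSelfA additional py_asset_id)
    | none => (pvPassOnceA rest jd py_asset_id).map (fun r => x :: r)

-- A's while loop: runs while a replacement happened and iteration_limit > 0; the limit
-- drops by one per pass, so iteration_limit.toNat passes is exactly the guard (on the
-- raising inputs, excluded by Pre_, the port simply returns the list reached)
def pvLoopA (fuel : Nat) (L : List (String × String)) (jd : List (String × List (String × String))) (py_asset_id : String) : List (String × String) :=
  match fuel with
  | 0 => L
  | n + 1 =>
    match pvPassOnceA L jd py_asset_id with
    | some L' => pvLoopA n L' jd py_asset_id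
    | none => L

def replace_joint_in_connected_assets (connected_py_assets : List (String × String)) (py_joint_dict : List (String × List (String × String))) (py_asset_id : String) (iteration_limit : Int) : List (String × String) :=
  pvLoopA iteration_limit.toNat connected_py_assets py_joint_dict py_asset_id

-- ===== PORT B =====
-- Source B's inner for loop: the joint's connection list with the first entry for py_asset_id deleted
def pvDropSelfB (assets : List (String × String)) (py_asset_id : String) : List (String × String) :=
  match assets with
  | [] => []
  | a :: rest => if a.1 == py_asset_id then rest else a :: pvDropSelfB rest py_asset_id

-- Source B's worklist loop; exp is the running count of expansions, 'il ≤ exp + 1' is the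
-- Python 'expansions >= iteration_limit' cycle guard, where Source B raises RuntimeError
-- (outside Pre_; the port returns the unprocessed remainder there)
def pvLoopB (il : Int) (jd : List (String × List (String × String))) (aid : String) (exp : Int) (queue result : List (String × String)) : List (String × String) :=
  match queue with
  | [] => result
  | x :: q =>
    match pvJGet? jd x.1 with
    | some v =>
      if il ≤ exp + 1 then result ++ x :: q
      else pvLoopB il jd aid (exp + 1) (q ++ pvDropSelfB v aid) result
    | none => pvLoopB il jd aid exp q (result ++ [x])
termination_by ((il - exp).toNat, queue.length)
decreasing_by
  · apply Prod.Lex.left; omega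
  · apply Prod.Lex.right; simp

def replace_joint_in_connected_assets_alt (connected_py_assets : List (String × String)) (py_joint_dict : List (String × List (String × String))) (py_asset_id : String) (iteration_limit : Int) : List (String × String) :=
  pvLoopB iteration_limit py_joint_dict py_asset_id 0 connected_py_assets []

-- ===== PRECONDITION & SPEC =====
-- pvW/pvWSum: expansion weight of an asset id / of a list — the total number of joints
-- its expansion contains; a structural measure on the joint-dictionary graph (the depth
-- bound jd.length + 1 covers every acyclic joint path, so 'none' means a reachable cycle)
def pvOptAdd (o1 o2 : Option Nat) : Option Nat :=
  match o1, o2 with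
  | some a, some b => some (a + b)
  | _, _ => none

def pvW (jd : List (String × List (String × String))) (aid : String) (depth : Nat) (s : String) : Option Nat :=
  match List.lookup s jd with
  | none => some 0
  | some v =>
    match depth with
    | 0 => none
    | d + 1 => ((v.eraseP (fun a => a.1 == aid)).foldr (fun a acc => pvOptAdd (pvW jd aid d a.1) acc) (some 0)).map (· + 1)
termination_by structural depth

def pvWSum (jd : List (String × List (String × String))) (aid : String) (depth : Nat) (l : List (String × String)) : Option Nat :=
  l.foldr (fun a acc => pvOptAdd (pvW jd aid depth a.1) acc) (some 0)

-- Pre_ admits exactly the inputs on which both Pythons return: A raises RuntimeError once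
-- its pass cap is exhausted (0 ≤ iteration_limit ≤ total expansions + 1, in particular on
-- every reachable joint cycle), and Pre_ also excludes negative iteration_limit with a
-- joint in the list, where A skips expansion and returns the list unexpanded while B's
-- cycle guard raises RuntimeError (see cites).
def Pre_replace_joint_in_connected_assets (connected_py_assets : List (String × String)) (py_joint_dict : List (String × List (String × String))) (py_asset_id : String) (iteration_limit : Int) : Prop :=
  (iteration_limit < 0 ∧ ∀ x ∈ connected_py_assets, List.lookup x.1 py_joint_dict = none)
  ∨ (pvWSum py_joint_dict py_asset_id (py_joint_dict.length + 1) connected_py_assets ≠ none ∧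
     ((pvWSum py_joint_dict py_asset_id (py_joint_dict.length + 1) connected_py_assets).getD 0 : Int) + 2 ≤ iteration_limit)
instance (connected_py_assets : List (String × String)) (py_joint_dict : List (String × List (String × String))) (py_asset_id : String) (iteration_limit : Int) : Decidable (Pre_replace_joint_in_connected_assets connected_py_assets py_joint_dict py_asset_id iteration_limit) := by unfold Pre_replace_joint_in_connected_assets; infer_instance

def pvWitness_replace_joint_in_connected_assets : (List (String × String)) × (List (String × List (String × String))) × String × Int :=
  ([("j", "p"), ("b", "q")], [("j", [("b", "q"), ("a", "z"), ("a", "y")])], "a", 5)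

def Spec_replace_joint_in_connected_assets (connected_py_assets : List (String × String)) (py_joint_dict : List (String × List (String × String))) (py_asset_id : String) (iteration_limit : Int) (out : List (String × String)) : Prop := out = replace_joint_in_connected_assets_alt connected_py_assets py_joint_dict py_asset_id iteration_limit
instance (connected_py_assets : List (String × String)) (py_joint_dict : List (String × List (String × String))) (py_asset_id : String) (iteration_limit : Int) (out : List (String × String)) : Decidable (Spec_replace_joint_in_connected_assets connected_py_assets py_joint_dict py_asset_id iteration_limit out) := by unfold Spec_replace_joint_in_connected_assets; infer_instance

-- ===== CLAIM (what is proved, stated in full; the proofs are below) =====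
def Claim_equal_replace_joint_in_connected_assets : Prop := ∀ (connected_py_assets : List (String × String)) (py_joint_dict : List (String × List (String × String))) (py_asset_id : String) (iteration_limit : Int), Dom_replace_joint_in_connected_assets connected_py_assets py_joint_dict py_asset_id iteration_limit → Pre_replace_joint_in_connected_assets connected_py_assets py_joint_dict py_asset_id iteration_limit → Spec_replace_joint_in_connected_assets connected_py_assets py_joint_dict py_asset_id iteration_limit (replace_joint_in_connected_assets connected_py_assets py_joint_dict py_asset_id iteration_limit)

-- ===== LEMMAS AND PROOFS =====

lemma pvDrop_eq_remove (assets : List (String × String)) (aid : String) :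
    pvDropSelfB assets aid = pvRemoveSelfA assets aid := by
  induction assets with
  | nil => rfl
  | cons a rest ih => simp [pvDropSelfB, pvRemoveSelfA, ih]

lemma pvPassOnceA_append_nonjoint (res q : List (String × String)) (jd : List (String × List (String × String))) (aid : String)
    (hres : ∀ x ∈ res, pvJGet? jd x.1 = none) :
    pvPassOnceA (res ++ q) jd aid = (pvPassOnceA q jd aid).map (fun r => res ++ r) := by
  induction res with
  | nil => simp
  | cons x res' ih =>
    have hx : pvJGet? jd x.1 = none := hres x List.mem_cons_self
    have ih' := ih (fun y hy => hres y (List.mem_cons_of_mem _ hy))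
    simp only [List.cons_append, pvPassOnceA, hx, ih', Option.map_map]
    cases pvPassOnceA q jd aid <;> simp

lemma pvLookup_eq_pvJGet? (jd : List (String × List (String × String))) (k : String) :
    List.lookup k jd = pvJGet? jd k := by
  induction jd with
  | nil => simp [pvJGet?]
  | cons kv rest ih =>
    obtain ⟨k', v⟩ := kv
    by_cases h : k' = k
    · subst h; simp [pvJGet?, List.lookup]
    · have h1 : (k == k') = false := by simp [Ne.symm h]
      have h2 : (k' == k) = false := by simp [h]
      simp [pvJGet?, List.lookup, h1, h2, ih]

lemma pvErase_eq_drop (l : List (String × String)) (aid : String) :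
    l.eraseP (fun a => a.1 == aid) = pvDropSelfB l aid := by
  induction l with
  | nil => rfl
  | cons a rest ih =>
    by_cases h : a.1 = aid
    · simp [pvDropSelfB, h]
    · simp [pvDropSelfB, h, ih]

lemma pvWSum_nil (jd : List (String × List (String × String))) (aid : String) (f : Nat) :
    pvWSum jd aid f [] = some 0 := rfl

lemma pvWSum_cons (jd : List (String × List (String × String))) (aid : String) (f : Nat)
    (a : String × String) (t : List (String × String)) :
    pvWSum jd aid f (a :: t) = pvOptAdd (pvW jd aid f a.1) (pvWSum jd aid f t) := rfl

lemma pvW_nonjoint (jd : List (String × List (String × String))) (aid : String) (f : Nat)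
    (s : String) (hj : pvJGet? jd s = none) : pvW jd aid f s = some 0 := by
  unfold pvW; rw [pvLookup_eq_pvJGet?, hj]

lemma pvW_joint_zero (jd : List (String × List (String × String))) (aid : String)
    (s : String) (v : List (String × String)) (hj : pvJGet? jd s = some v) :
    pvW jd aid 0 s = none := by
  unfold pvW; rw [pvLookup_eq_pvJGet?, hj]

lemma pvW_joint (jd : List (String × List (String × String))) (aid : String) (f : Nat)
    (s : String) (v : List (String × String)) (hj : pvJGet? jd s = some v) :
    pvW jd aid (f + 1) s = (pvWSum jd aid f (pvDropSelfB v aid)).map (· + 1) := by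
  unfold pvW; rw [pvLookup_eq_pvJGet?, hj, ← pvErase_eq_drop]; rfl

lemma pvOptAdd_eq_some {o1 o2 : Option Nat} {k : Nat} (h : pvOptAdd o1 o2 = some k) :
    ∃ a b, o1 = some a ∧ o2 = some b ∧ k = a + b := by
  cases o1 with
  | none => simp [pvOptAdd] at h
  | some a =>
    cases o2 with
    | none => simp [pvOptAdd] at h
    | some b => exact ⟨a, b, rfl, rfl, by simpa [pvOptAdd] using h.symm⟩

lemma pvWSum_mono_of (jd : List (String × List (String × String))) (aid : String) (f f' : Nat)
    (hm : ∀ s k, pvW jd aid f s = some k → pvW jd aid f' s = some k) :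
    ∀ (l : List (String × String)) (S : Nat), pvWSum jd aid f l = some S → pvWSum jd aid f' l = some S := by
  intro l
  induction l with
  | nil => intro S h; simpa [pvWSum_nil] using h
  | cons a t iht =>
    intro S h
    rw [pvWSum_cons] at h
    obtain ⟨w, s, hw, hs, rfl⟩ := pvOptAdd_eq_some h
    rw [pvWSum_cons, hm a.1 w hw, iht s hs]
    rfl

lemma pvW_mono (jd : List (String × List (String × String))) (aid : String) :
    ∀ (f f' : Nat) (s : String) (k : Nat), f ≤ f' → pvW jd aid f s = some k → pvW jd aid f' s = some k := by
  intro f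
  induction f with
  | zero =>
    intro f' s k _ h
    cases hj : pvJGet? jd s with
    | none =>
      rw [pvW_nonjoint jd aid 0 s hj] at h
      rw [pvW_nonjoint jd aid f' s hj]
      exact h
    | some v => rw [pvW_joint_zero jd aid s v hj] at h; exact absurd h (by simp)
  | succ f ih =>
    intro f' s k hle h
    cases hj : pvJGet? jd s with
    | none =>
      rw [pvW_nonjoint jd aid (f + 1) s hj] at h
      rw [pvW_nonjoint jd aid f' s hj]
      exact h
    | some v =>
      obtain ⟨f'', rfl⟩ : ∃ f'', f' = f'' + 1 := ⟨f' - 1, by omega⟩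
      rw [pvW_joint jd aid f s v hj] at h
      rw [pvW_joint jd aid f'' s v hj]
      simp only [Option.map_eq_some_iff] at h ⊢
      obtain ⟨S, hS, hk⟩ := h
      exact ⟨S, pvWSum_mono_of jd aid f f'' (fun s' k' => ih f'' s' k' (by omega)) _ S hS, hk⟩

lemma pvWSum_mono (jd : List (String × List (String × String))) (aid : String) (f f' : Nat)
    (hle : f ≤ f') (l : List (String × String)) (S : Nat)
    (h : pvWSum jd aid f l = some S) : pvWSum jd aid f' l = some S :=
  pvWSum_mono_of jd aid f f' (fun s k => pvW_mono jd aid f f' s k hle) l S h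

lemma pvWSum_append (jd : List (String × List (String × String))) (aid : String) (f : Nat)
    (l1 l2 : List (String × String)) (a b : Nat)
    (h1 : pvWSum jd aid f l1 = some a) (h2 : pvWSum jd aid f l2 = some b) :
    pvWSum jd aid f (l1 ++ l2) = some (a + b) := by
  induction l1 generalizing a with
  | nil =>
    rw [pvWSum_nil] at h1
    simp only [Option.some.injEq] at h1
    subst h1; simpa using h2
  | cons x t iht =>
    rw [pvWSum_cons] at h1
    obtain ⟨w, s, hw, hs, rfl⟩ := pvOptAdd_eq_some h1
    rw [List.cons_append, pvWSum_cons, hw, iht s hs]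
    simp [pvOptAdd]
    omega

lemma pvLoopB_nojoint (il : Int) (jd : List (String × List (String × String))) (aid : String) :
    ∀ (q res : List (String × String)) (exp : Int), (∀ x ∈ q, pvJGet? jd x.1 = none) →
      pvLoopB il jd aid exp q res = res ++ q := by
  intro q
  induction q with
  | nil => intro res exp _; simp [pvLoopB]
  | cons x q' ih =>
    intro res exp hq
    have hx : pvJGet? jd x.1 = none := hq x List.mem_cons_self
    rw [pvLoopB]
    simp only [hx]
    rw [ih (res ++ [x]) exp (fun y hy => hq y (List.mem_cons_of_mem _ hy))]
    simp

lemma pvMainW (jd : List (String × List (String × String))) (aid : String) (il : Int) :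
    ∀ (n : Nat) (q res : List (String × String)) (exp : Int) (fuel : Nat) (W : Nat),
      (∀ x ∈ res, pvJGet? jd x.1 = none) →
      pvWSum jd aid (jd.length + 1) q = some W →
      W ≤ n → W + 1 ≤ fuel → exp + (W : Int) + 1 ≤ il →
      pvLoopA fuel (res ++ q) jd aid = pvLoopB il jd aid exp q res := by
  intro n
  induction n with
  | zero =>
    intro q
    induction q with
    | nil =>
      intro res exp fuel W hres _ _ hfuel _
      obtain ⟨f, rfl⟩ : ∃ f, fuel = f + 1 := ⟨fuel - 1, by omega⟩
      have hp : pvPassOnceA res jd aid = none := by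
        have h := pvPassOnceA_append_nonjoint res [] jd aid hres
        simpa using h
      simp [pvLoopA, pvLoopB, hp]
    | cons x q' ihq =>
      intro res exp fuel W hres hWS hn hfuel hil
      rw [pvWSum_cons] at hWS
      obtain ⟨wx, wq, hwx, hwq, rfl⟩ := pvOptAdd_eq_some hWS
      cases hj : pvJGet? jd x.1 with
      | some v =>
        exfalso
        rw [pvW_joint jd aid jd.length x.1 v hj] at hwx
        simp only [Option.map_eq_some_iff] at hwx
        obtain ⟨S, _, hk⟩ := hwx
        omega
      | none =>
        rw [pvW_nonjoint jd aid (jd.length + 1) x.1 hj] at hwx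
        simp only [Option.some.injEq] at hwx
        rw [pvLoopB]
        simp only [hj]
        have := ihq (res ++ [x]) exp fuel wq
          (by intro y hy
              rcases List.mem_append.mp hy with h | h
              · exact hres y h
              · simpa using (List.mem_singleton.mp h) ▸ hj)
          hwq (by omega) (by omega) (by push_cast at hil ⊢; omega)
        have h2 : res ++ x :: q' = (res ++ [x]) ++ q' := by simp
        rw [h2]; exact this
  | succ m ihn =>
    intro q
    induction q with
    | nil =>
      intro res exp fuel W hres _ _ hfuel _
      obtain ⟨f, rfl⟩ : ∃ f, fuel = f + 1 := ⟨fuel - 1, by omega⟩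
      have hp : pvPassOnceA res jd aid = none := by
        have h := pvPassOnceA_append_nonjoint res [] jd aid hres
        simpa using h
      simp [pvLoopA, pvLoopB, hp]
    | cons x q' ihq =>
      intro res exp fuel W hres hWS hn hfuel hil
      rw [pvWSum_cons] at hWS
      obtain ⟨wx, wq, hwx, hwq, rfl⟩ := pvOptAdd_eq_some hWS
      cases hj : pvJGet? jd x.1 with
      | none =>
        rw [pvW_nonjoint jd aid (jd.length + 1) x.1 hj] at hwx
        simp only [Option.some.injEq] at hwx
        rw [pvLoopB]
        simp only [hj]
        have := ihq (res ++ [x]) exp fuel wq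
          (by intro y hy
              rcases List.mem_append.mp hy with h | h
              · exact hres y h
              · simpa using (List.mem_singleton.mp h) ▸ hj)
          hwq (by omega) (by omega) (by push_cast at hil ⊢; omega)
        have h2 : res ++ x :: q' = (res ++ [x]) ++ q' := by simp
        rw [h2]; exact this
      | some v =>
        rw [pvW_joint jd aid jd.length x.1 v hj] at hwx
        simp only [Option.map_eq_some_iff] at hwx
        obtain ⟨S, hS, hwxS⟩ := hwx
        have hSfull : pvWSum jd aid (jd.length + 1) (pvDropSelfB v aid) = some S :=
          pvWSum_mono jd aid jd.length (jd.length + 1) (by omega) _ S hS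
        have hnew : pvWSum jd aid (jd.length + 1) (q' ++ pvDropSelfB v aid) = some (wq + S) :=
          pvWSum_append jd aid (jd.length + 1) q' (pvDropSelfB v aid) wq S hwq hSfull
        obtain ⟨f, rfl⟩ : ∃ f, fuel = f + 1 := ⟨fuel - 1, by omega⟩
        have hp : pvPassOnceA (res ++ x :: q') jd aid
            = some (res ++ (q' ++ pvRemoveSelfA v aid)) := by
          rw [pvPassOnceA_append_nonjoint res (x :: q') jd aid hres]
          simp [pvPassOnceA, hj]
        rw [pvLoopA]
        simp only [hp]
        rw [pvLoopB]
        simp only [hj]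
        rw [if_neg (by omega)]
        rw [pvDrop_eq_remove] at hnew ⊢
        exact ihn (q' ++ pvRemoveSelfA v aid) res (exp + 1) f (wq + S) hres hnew
          (by omega) (by omega) (by push_cast at hil ⊢; omega)

-- ===== VERDICT (by name: the statement is the Claim_ definition above) =====
theorem replace_joint_in_connected_assets_spec : Claim_equal_replace_joint_in_connected_assets := by
  intro cpa jd aid il _hdom hpre
  unfold Spec_replace_joint_in_connected_assets
  unfold replace_joint_in_connected_assets replace_joint_in_connected_assets_alt
  rcases hpre with ⟨hneg, hnoj⟩ | ⟨hne, hge⟩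
  · have h0 : il.toNat = 0 := by omega
    rw [h0, pvLoopB_nojoint il jd aid cpa [] 0
      (fun x hx => by rw [← pvLookup_eq_pvJGet?]; exact hnoj x hx)]
    simp [pvLoopA]
  · obtain ⟨R, hR⟩ : ∃ R, pvWSum jd aid (jd.length + 1) cpa = some R :=
      Option.ne_none_iff_exists'.mp hne
    rw [hR] at hge
    simp only [Option.getD_some] at hge
    have := pvMainW jd aid il R cpa [] 0 il.toNat R
      (by intro y hy; simp at hy) hR le_rfl (by omega) (by omega)
    simpa using this
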